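-- pv_equiv track=rewrite | github.com/kimchaeeun3447/Algorithm | 프로그래머스/lv1/68935. 3진법 뒤집기/3진법 뒤집기.py | solution
-- ===== SOURCE A (Python) =====
-- def solution(n):
--     s = ''
--
--     #3진법으로 바꾸기
--     while n > 2:
--         n, rest = divmod(n, 3)
--         s += str(rest)
--     s += str(n)
--
--     #3진수 10진수로 바꾸기
--     answer = int(s, 3)
--
--     return answer
-- ===== SOURCE B (Python) =====
-- def solution(n):
--     answer = 0
--     while n > 0:
--         n, rest = divmod(n, 3)
--         answer = answer * 3 + rest
--     return answer
-- ===== Notes on version B (the rewrite author's own statement) =====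
-- stated objective: simpler
-- what changed: Single-pass Horner accumulation (answer = answer*3 + digit while dividing n by 3) replaces A's two phases of building a reversed base-3 digit string and re-parsing it with int(s, 3).
-- outside the precondition, e.g. on solution(-1): A returns -1, B returns 0; on solution(-2): A returns -2, B returns 0; on solution(-3): A raises ValueError, B returns 0
import Mathlib
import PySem

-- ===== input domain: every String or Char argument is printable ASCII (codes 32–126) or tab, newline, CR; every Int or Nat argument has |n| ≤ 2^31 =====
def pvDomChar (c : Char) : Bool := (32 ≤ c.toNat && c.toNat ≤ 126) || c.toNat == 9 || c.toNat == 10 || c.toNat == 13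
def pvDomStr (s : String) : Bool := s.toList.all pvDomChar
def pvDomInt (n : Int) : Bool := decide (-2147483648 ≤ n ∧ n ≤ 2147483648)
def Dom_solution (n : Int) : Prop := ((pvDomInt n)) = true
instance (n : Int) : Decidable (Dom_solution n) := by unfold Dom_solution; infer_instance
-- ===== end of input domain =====

-- B replaces A's build-reversed-digit-string-then-int(s,3) with a single Horner pass on an
-- integer accumulator (objective: simpler).

-- ===== PORT A =====
-- the while-loop of A: build the base-3 digit string, least significant digit first
def solutionLoop (n : Int) (s : String) : String :=
  if n > 2 then
    solutionLoop (PySem.Int.floordiv n 3) (s ++ PySem.Int.toStr (PySem.Int.mod n 3))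
  else s ++ PySem.Int.toStr n
termination_by n.toNat
decreasing_by
  rename_i h
  rw [PySem.Int.floordiv_eq_ediv_of_pos (by omega : (0:Int) < 3)]
  omega

-- hand port of int(s, 3) (PySem has no base argument): optional leading '-', then base-3
-- digit chars, Horner fold; exact on the strings A builds here (sign followed by digits).
def parse3Digits (acc : Int) (l : List Char) : Int :=
  match l with
  | [] => acc
  | c :: cs => parse3Digits (acc * 3 + ((c.toNat : Int) - 48)) cs

def parse3Core (l : List Char) : Int :=
  if l.head? = some '-' then -(parse3Digits 0 l.tail) else parse3Digits 0 l

def solution (n : Int) : Int := parse3Core (solutionLoop n "").toList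

-- ===== PORT B =====
-- Horner loop: while n > 0: n, rest = divmod(n, 3); answer = answer*3 + rest
def solutionAltLoop (n answer : Int) : Int :=
  if n > 0 then
    solutionAltLoop (PySem.Int.floordiv n 3) (answer * 3 + PySem.Int.mod n 3)
  else answer
termination_by n.toNat
decreasing_by
  rename_i h
  rw [PySem.Int.floordiv_eq_ediv_of_pos (by omega : (0:Int) < 3)]
  omega

def solution_alt (n : Int) : Int := solutionAltLoop n 0

-- ===== PRECONDITION & SPEC =====
-- Pre_ excludes negative n: for n ≤ -3 A raises ValueError (int(str(n), 3) hits an invalid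
-- digit), and for n = -1, -2 A's returning n itself is an accident of int('-1',3)/int('-2',3)
-- parsing — a corner no caller of this base-3 task specifies; B returns 0 there.
def Pre_solution (n : Int) : Prop := 0 ≤ n
instance (n : Int) : Decidable (Pre_solution n) := by unfold Pre_solution; infer_instance

def pvWitness_solution : Int := 5

def Spec_solution (n : Int) (out : Int) : Prop := out = solution_alt n
instance (n : Int) (out : Int) : Decidable (Spec_solution n out) := by unfold Spec_solution; infer_instance

-- ===== CLAIM (what is proved, stated in full; the proofs are below) =====
def Claim_equal_solution : Prop := ∀ (n : Int), Dom_solution n → Pre_solution n → Spec_solution n (solution n)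

-- ===== LEMMAS AND PROOFS =====

-- the digit characters A's loop appends, in order of appending (LSB first)
def chars3 (n : Int) : List Char :=
  if n > 2 then (PySem.Int.toStr (PySem.Int.mod n 3)).toList ++ chars3 (PySem.Int.floordiv n 3)
  else (PySem.Int.toStr n).toList
termination_by n.toNat
decreasing_by
  rename_i h
  rw [PySem.Int.floordiv_eq_ediv_of_pos (by omega : (0:Int) < 3)]
  omega

theorem solutionLoop_toList : ∀ (k : Nat) (n : Int) (s : String), n.toNat ≤ k →
    (solutionLoop n s).toList = s.toList ++ chars3 n := by
  intro k
  induction k with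
  | zero =>
    intro n s h
    unfold solutionLoop chars3
    have : ¬ n > 2 := by omega
    simp [this]
  | succ k ih =>
    intro n s h
    unfold solutionLoop chars3
    by_cases hn : n > 2
    · have hd : PySem.Int.floordiv n 3 = n / 3 :=
        PySem.Int.floordiv_eq_ediv_of_pos (by omega)
      simp only [hn, if_true]
      rw [ih _ _ (by rw [hd]; omega)]
      simp
    · simp [hn]

theorem parse3Digits_chars3 : ∀ (k : Nat) (n acc : Int), 1 ≤ n → n.toNat ≤ k →
    parse3Digits acc (chars3 n) = solutionAltLoop n acc := by
  intro k
  induction k with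
  | zero => intro n acc h1 h2; omega
  | succ k ih =>
    intro n acc h1 h2
    unfold chars3 solutionAltLoop
    have hd : PySem.Int.floordiv n 3 = n / 3 :=
      PySem.Int.floordiv_eq_ediv_of_pos (by omega)
    have hm : PySem.Int.mod n 3 = n % 3 :=
      PySem.Int.mod_eq_emod_of_pos (by omega)
    by_cases hn : n > 2
    · simp only [hn, if_true, show n > 0 by omega, if_true]
      have hrec : parse3Digits (acc * 3 + PySem.Int.mod n 3)
          (chars3 (PySem.Int.floordiv n 3)) =
          solutionAltLoop (PySem.Int.floordiv n 3) (acc * 3 + PySem.Int.mod n 3) :=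
        ih _ _ (by rw [hd]; omega) (by rw [hd]; omega)
      have hm3 : n % 3 = 0 ∨ n % 3 = 1 ∨ n % 3 = 2 := by omega
      have t0 : (PySem.Int.toStr 0).toList = ['0'] := by decide
      have t1 : (PySem.Int.toStr 1).toList = ['1'] := by decide
      have t2 : (PySem.Int.toStr 2).toList = ['2'] := by decide
      rcases hm3 with h3 | h3 | h3 <;>
        · rw [hm, h3] at hrec ⊢
          simp only [t0, t1, t2, List.cons_append, List.nil_append, parse3Digits]
          norm_num
          convert hrec using 2 <;> norm_num
    · have t1 : (PySem.Int.toStr 1).toList = ['1'] := by decide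
      have t2 : (PySem.Int.toStr 2).toList = ['2'] := by decide
      have salt0 : ∀ a : Int, solutionAltLoop 0 a = a := by
        intro a; unfold solutionAltLoop; norm_num
      have h12 : n = 1 ∨ n = 2 := by omega
      have f1 : Int.fdiv 1 3 = 0 := by decide
      have f2 : Int.fdiv 2 3 = 0 := by decide
      have g1 : Int.fmod 1 3 = 1 := by decide
      have g2 : Int.fmod 2 3 = 2 := by decide
      have c1 : (('1'.toNat : Int)) = 49 := by decide
      have c2 : (('2'.toNat : Int)) = 50 := by decide
      rcases h12 with rfl | rfl
      · norm_num [t1, parse3Digits, salt0, PySem.Int.floordiv, PySem.Int.mod,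
                  f1, g1, c1]
      · norm_num [t2, parse3Digits, salt0, PySem.Int.floordiv, PySem.Int.mod,
                  f2, g2, c2]

theorem chars3_head (n : Int) (h : 0 ≤ n) : (chars3 n).head? ≠ some '-' := by
  unfold chars3
  have t0 : (PySem.Int.toStr 0).toList = ['0'] := by decide
  have t1 : (PySem.Int.toStr 1).toList = ['1'] := by decide
  have t2 : (PySem.Int.toStr 2).toList = ['2'] := by decide
  by_cases hn : n > 2
  · have hm : PySem.Int.mod n 3 = n % 3 :=
      PySem.Int.mod_eq_emod_of_pos (by omega)
    have hm3 : n % 3 = 0 ∨ n % 3 = 1 ∨ n % 3 = 2 := by omega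
    rcases hm3 with h3 | h3 | h3 <;>
      · rw [hm, h3]
        simp [hn, t0, t1, t2]
  · have h012 : n = 0 ∨ n = 1 ∨ n = 2 := by omega
    rcases h012 with rfl | rfl | rfl <;> simp [hn, t0, t1, t2]

-- ===== VERDICT (by name: the statement is the Claim_ definition above) =====
theorem solution_spec : Claim_equal_solution := by
  intro n _ hpre
  have hge : 0 ≤ n := hpre
  unfold Spec_solution solution solution_alt
  rw [solutionLoop_toList n.toNat n "" le_rfl]
  have hempty : ("" : String).toList = [] := by decide
  rw [hempty, List.nil_append]
  unfold parse3Core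
  rw [if_neg (by exact fun hc => chars3_head n hge hc)]
  by_cases h0 : n = 0
  · subst h0
    have hc0 : chars3 0 = ['0'] := by
      unfold chars3; norm_num
      decide
    rw [hc0]
    simp only [parse3Digits]
    unfold solutionAltLoop
    norm_num
    decide
  · exact parse3Digits_chars3 n.toNat n 0 (by omega) le_rfl
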